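-- pv_equiv track=rewrite | github.com/PurdueECE/action-foreach | test_data/run-20220411_180859/PurdueECE364-prelabs-wxjdsr/Prelab01/simpleTasks.py | getStreaks
-- ===== SOURCE A (Python) =====
-- def findLength(sequence: str, letter: str) -> int:
--     length = 0
--     for index in range(len(sequence)):
--         if sequence[index] == letter:
--             length += 1
--         else:
--             break
--     return length
--
-- def getStreaks(sequence: str, letters: str) -> list[str]:
--     # identify the individual letters
--     letter_list = []
--     for single_letter in letters:
--         if single_letter not in letter_list:
--             letter_list.append(single_letter)
--
--     # find the sequence
--     match_sequence = []
--     index = 0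
--
--     # make sure there is no index-out-of-bound
--     while index < len(sequence):
--         if sequence[index] in letter_list:      # if found, put it into the result list
--             length = findLength(sequence[index:], sequence[index])
--             match_sequence.append(sequence[index] * length)
--             index += length     # continue searching after these found letters
--         else:                   # if not found, go to the next index
--             index += 1
--
--     return match_sequence
-- ===== SOURCE B (Python) =====
-- def getStreaks(sequence: str, letters: str) -> list[str]:
--     allowed = set(letters)
--     result = []
--     run = ""
--     for c in sequence:
--         if c in allowed:
--             if run and run[-1] == c:
--                 run += c
--             else:
--                 if run:
--                     result.append(run)
--                 run = c
--         else:
--             if run: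
--                 result.append(run)
--                 run = ""
--     if run:
--         result.append(run)
--     return result
-- ===== Notes on version B (the rewrite author's own statement) =====
-- stated objective: faster
-- what changed: Replaced the slice-and-rescan while loop (findLength on sequence[index:] copies a suffix each streak) and the O(|letters|) list membership test by a single left-to-right fold that grows the current run and flushes it on change, with a set for membership.
import Mathlib
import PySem

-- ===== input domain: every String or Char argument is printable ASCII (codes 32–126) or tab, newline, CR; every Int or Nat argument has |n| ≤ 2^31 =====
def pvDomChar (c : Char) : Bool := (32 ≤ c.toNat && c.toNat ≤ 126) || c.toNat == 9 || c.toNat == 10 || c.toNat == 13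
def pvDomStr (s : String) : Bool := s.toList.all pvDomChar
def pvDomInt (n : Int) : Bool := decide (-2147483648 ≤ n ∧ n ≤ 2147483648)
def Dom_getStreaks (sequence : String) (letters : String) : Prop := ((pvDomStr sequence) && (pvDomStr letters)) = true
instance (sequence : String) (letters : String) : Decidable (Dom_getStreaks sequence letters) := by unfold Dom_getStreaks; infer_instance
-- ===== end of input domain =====

-- B replaces A's slice-and-rescan while loop by a single left-to-right fold that grows the
-- current run and flushes it on change (objective: faster, one linear pass).

-- ===== PORT A =====
-- findLength: count of leading characters equal to `letter` (Python's indexed for-loop with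
-- break, ported as structural recursion over the same prefix scan).
def findLengthA : List Char → Char → Nat
  | [], _ => 0
  | x :: xs, c => if x == c then 1 + findLengthA xs c else 0

-- letter_list: Python's manual dedup loop ("if single_letter not in letter_list: append").
def pyLetterList (letters : List Char) : List Char :=
  letters.foldl (fun acc c => if acc.contains c then acc else acc ++ [c]) []

-- the while loop over `index`: the index only moves forward, so it is the same computation as
-- this recursion on the remaining suffix; sequence[index] * length is replicate.
def getStreaksLoop (letterList : List Char) : List Char → List String
  | [] => []
  | x :: xs =>
    if letterList.contains x then
      String.ofList (List.replicate (findLengthA (x :: xs) x) x) ::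
        getStreaksLoop letterList ((x :: xs).drop (findLengthA (x :: xs) x))
    else
      getStreaksLoop letterList xs
  termination_by l => l.length
  decreasing_by
  · have h1 : findLengthA (x :: xs) x = 1 + findLengthA xs x := by
      simp [findLengthA]
    simp [h1]
  · simp

def getStreaks (sequence : String) (letters : String) : List String :=
  getStreaksLoop (pyLetterList letters.toList) sequence.toList

-- ===== PORT B =====
-- one fold step: state = (finished runs, current run); `run and run[-1] == c` is exactly
-- `run.getLast? == some c` (the empty run has getLast? = none).
def stepB (allowed : PySem.Set Char) (st : List String × List Char) (c : Char) :
    List String × List Char :=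
  if PySem.Set.contains allowed c then
    if st.2.getLast? == some c then (st.1, st.2 ++ [c])
    else ((if st.2.isEmpty then st.1 else st.1 ++ [String.ofList st.2]), [c])
  else
    if st.2.isEmpty then st else (st.1 ++ [String.ofList st.2], [])

def finishB (st : List String × List Char) : List String :=
  if st.2.isEmpty then st.1 else st.1 ++ [String.ofList st.2]

def getStreaks_alt (sequence : String) (letters : String) : List String :=
  finishB (sequence.toList.foldl (stepB (PySem.Set.ofList letters.toList)) ([], []))

-- ===== PRECONDITION & SPEC =====
def Spec_getStreaks (sequence : String) (letters : String) (out : List String) : Prop := out = getStreaks_alt sequence letters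
instance (sequence : String) (letters : String) (out : List String) : Decidable (Spec_getStreaks sequence letters out) := by unfold Spec_getStreaks; infer_instance

-- ===== CLAIM (what is proved, stated in full; the proofs are below) =====
def Claim_equal_getStreaks : Prop := ∀ (sequence : String) (letters : String), Dom_getStreaks sequence letters → Spec_getStreaks sequence letters (getStreaks sequence letters)

-- ===== LEMMAS AND PROOFS =====

lemma findLengthA_eq_takeWhile (l : List Char) (c : Char) :
    findLengthA l c = (l.takeWhile (· == c)).length := by
  induction l with
  | nil => rfl
  | cons x xs ih =>
    by_cases h : x == c
    · simp [findLengthA, h, ih, Nat.add_comm]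
    · simp [findLengthA, h]

lemma drop_takeWhile_length (p : Char → Bool) (l : List Char) :
    l.drop ((l.takeWhile p).length) = l.dropWhile p := by
  induction l with
  | nil => rfl
  | cons x xs ih =>
    by_cases h : p x
    · simp [h, ih]
    · simp [h]

lemma loopA_streak (m : List Char) (x : Char) (xs : List Char) (hx : x ∈ m) :
    getStreaksLoop m (x :: xs) =
      String.ofList (List.replicate (1 + (xs.takeWhile (· == x)).length) x) ::
        getStreaksLoop m (xs.dropWhile (· == x)) := by
  rw [getStreaksLoop]
  have hlen : findLengthA (x :: xs) x = 1 + (xs.takeWhile (· == x)).length := by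
    simp [findLengthA, findLengthA_eq_takeWhile]
  have hdrop : (x :: xs).drop (findLengthA (x :: xs) x) = xs.dropWhile (· == x) := by
    rw [hlen]
    have := drop_takeWhile_length (· == x) (x :: xs)
    simpa [List.takeWhile_cons, List.dropWhile_cons, Nat.add_comm] using this
  rw [hdrop, hlen]
  simp [hx]

lemma foldB_spec (m : List Char) (l : List Char) :
    (∀ res, finishB (List.foldl (stepB m) (res, []) l) = res ++ getStreaksLoop m l) ∧
    (∀ res (c : Char) (k : Nat), 0 < k → c ∈ m →
       finishB (List.foldl (stepB m) (res, List.replicate k c) l) =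
         res ++ String.ofList (List.replicate (k + (l.takeWhile (· == c)).length) c) ::
           getStreaksLoop m (l.dropWhile (· == c))) := by
  induction l with
  | nil =>
    constructor
    · intro res; simp [finishB, getStreaksLoop]
    · intro res c k hk hc
      simp [finishB, getStreaksLoop, Nat.pos_iff_ne_zero.mp hk]
  | cons x xs ih =>
    constructor
    · intro res
      by_cases hx : x ∈ m
      · have step : stepB m (res, []) x = (res, List.replicate 1 x) := by
          simp [stepB, PySem.Set.contains, hx]
        rw [List.foldl_cons, step, (ih.2) res x 1 (by omega) hx, loopA_streak m x xs hx]
      · have step : stepB m (res, []) x = (res, []) := by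
          simp [stepB, PySem.Set.contains, hx]
        rw [List.foldl_cons, step, ih.1 res, getStreaksLoop]
        simp [hx]
    · intro res c k hk hc
      have hne : (List.replicate k c).isEmpty = false := by
        simp [Nat.pos_iff_ne_zero.mp hk]
      have hlast : (List.replicate k c).getLast? = some c := by
        cases k with
        | zero => omega
        | succ n => simp [List.getLast?_replicate]
      by_cases hxc : x = c
      · subst hxc
        have step : stepB m (res, List.replicate k x) x = (res, List.replicate (k + 1) x) := by
          simp [stepB, PySem.Set.contains, hc, hlast, List.replicate_succ']
        rw [List.foldl_cons, step, (ih.2) res x (k + 1) (by omega) hc]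
        simp
        ring_nf
      · have hbeq : (x == c) = false := by simp [hxc]
        have hcx : ¬ c = x := fun h => hxc h.symm
        have htw : (x :: xs).takeWhile (· == c) = [] := by
          simp [hbeq]
        have hdw : (x :: xs).dropWhile (· == c) = x :: xs := by
          simp [hbeq]
        rw [htw, hdw]
        by_cases hx : x ∈ m
        · have step : stepB m (res, List.replicate k c) x =
              (res ++ [String.ofList (List.replicate k c)], List.replicate 1 x) := by
            simp [stepB, PySem.Set.contains, hx, hlast, hne, hcx]
          rw [List.foldl_cons, step,
            (ih.2) (res ++ [String.ofList (List.replicate k c)]) x 1 (by omega) hx,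
            loopA_streak m x xs hx]
          simp
        · have step : stepB m (res, List.replicate k c) x =
              (res ++ [String.ofList (List.replicate k c)], []) := by
            simp [stepB, PySem.Set.contains, hx, hne]
          rw [List.foldl_cons, step, ih.1, getStreaksLoop]
          simp [hx]

lemma pyLetterList_eq_ofList (l : List Char) : pyLetterList l = PySem.Set.ofList l := by
  rfl

-- ===== VERDICT (by name: the statement is the Claim_ definition above) =====
theorem getStreaks_spec : Claim_equal_getStreaks := by
  intro sequence letters _
  unfold Spec_getStreaks getStreaks getStreaks_alt
  rw [pyLetterList_eq_ofList]
  exact ((foldB_spec (PySem.Set.ofList letters.toList) sequence.toList).1 []).symm
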